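-- pv_equiv track=rewrite | github.com/Beliefree1996/FHESystem | government/myapp/NCC_getongtai2N.py | lattice_encryption
-- ===== SOURCE A (Python) =====
-- def MatrixModP(A, ms, ns, mods):  # m行#n列的矩阵A每个元素模p
--     for i in range(0,ms):
--         for j in range(0,ns):
--             A[i][j] =  A[i][j] % mods
--     return A
--
-- def MatrixDot(A,B,ms,o,ns,mods):#计算矩阵乘法,A是m*o的矩阵，B是o*n的矩阵
--     Matrix = [[] for i in range(ms)]  # 创建的是M行的二维列表
--     for i in range(0, ms):
--         for j in range(0, ns):
--             Matrix[i].append(0)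
--     for i in range(0,ms):
--         for j in range(0,ns):
--             for k in range(0,o):
--                 Matrix[i][j]=Matrix[i][j]+A[i][k]*B[k][j]
--     Matrix = MatrixModP(Matrix, ms, ns, mods)
--     return Matrix
--
-- def MatrixAdd(A,B,ms,ns,mods):  #代替np,add做矩阵加法
--     Matrix = [[] for i in range(ms)]  # 创建的是M行的二维列表
--     for i in range(0, ms):
--         for j in range(0, ns):
--             Matrix[i].append(0)
--     for i in range(0, ms):
--         for j in range(0, ns):
--             Matrix[i][j]=A[i][j]+B[i][j]
--     Matrix = MatrixModP(Matrix, ms, ns, mods)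
--     return Matrix
--
-- def lattice_encryption(plaintext, Mhard, Msoft,random_numbers, N, ns,mods): #加密运算
--     temp=list()
--     temp.append(plaintext)
--     ciphertext=MatrixDot(temp,Mhard,1,N,2*N,mods)
--     for i in range(ns):
--         add=MatrixDot(random_numbers[i],Msoft[i],1,N,2*N,mods)
--         ciphertext=MatrixAdd(ciphertext,add,1,2*N,mods)
--     return ciphertext #Deta,A,B
-- ===== SOURCE B (Python) =====
-- def lattice_encryption(plaintext, Mhard, Msoft, random_numbers, N, ns, mods):
--     # One pass per output column: accumulate the full integer dot products
--     # (plaintext row and all masked random rows) and reduce mod p once.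
--     row = []
--     for j in range(2 * N):
--         s = sum(plaintext[k] * Mhard[k][j] for k in range(N))
--         for i in range(ns):
--             s += sum(random_numbers[i][0][k] * Msoft[i][k][j] for k in range(N))
--         row.append(s % mods)
--     return [row]
-- ===== Notes on version B (the rewrite author's own statement) =====
-- stated objective: simpler
-- what changed: Replaces the three matrix helpers (zero-matrix allocation, triple-loop multiply, add, and a mod pass after every step) with a single column-major pass that accumulates the whole integer dot product per output column and reduces mod p exactly once, relying on mod distributing over addition.
import Mathlib
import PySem

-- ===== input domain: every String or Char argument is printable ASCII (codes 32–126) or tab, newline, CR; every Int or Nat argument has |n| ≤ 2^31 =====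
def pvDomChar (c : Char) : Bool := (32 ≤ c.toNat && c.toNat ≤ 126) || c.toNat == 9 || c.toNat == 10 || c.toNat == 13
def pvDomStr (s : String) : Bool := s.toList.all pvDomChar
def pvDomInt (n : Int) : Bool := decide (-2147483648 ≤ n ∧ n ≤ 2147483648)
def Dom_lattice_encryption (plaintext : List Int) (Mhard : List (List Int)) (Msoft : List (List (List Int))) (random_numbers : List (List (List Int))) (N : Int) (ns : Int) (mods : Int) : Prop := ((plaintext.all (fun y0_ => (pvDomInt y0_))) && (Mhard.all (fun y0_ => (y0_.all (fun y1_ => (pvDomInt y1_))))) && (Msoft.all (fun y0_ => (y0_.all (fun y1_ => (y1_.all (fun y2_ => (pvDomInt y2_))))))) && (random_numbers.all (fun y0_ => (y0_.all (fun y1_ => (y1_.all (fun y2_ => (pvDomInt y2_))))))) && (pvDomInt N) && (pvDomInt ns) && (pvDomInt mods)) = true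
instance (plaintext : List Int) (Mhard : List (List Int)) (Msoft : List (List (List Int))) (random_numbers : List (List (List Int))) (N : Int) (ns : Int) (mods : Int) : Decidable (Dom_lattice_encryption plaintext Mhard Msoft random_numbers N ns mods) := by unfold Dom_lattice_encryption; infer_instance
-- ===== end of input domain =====

-- B replaces A's matrix-helper pipeline (zero-matrix allocation, triple-loop multiply, add, and
-- a mod pass after every step) by one column-major pass that accumulates the whole integer dot
-- product per output column and reduces mod p once; objective: simpler.

-- ===== PORT A =====
-- A[i][j] read / write (Python list indexing; all indices here come from range(...), so they
-- are nonnegative; out-of-range indices are excluded by Pre_)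
def pvGetRC (M : List (List Int)) (i j : Int) : Int :=
  PySem.List.pyGetD (PySem.List.pyGetD M i []) j 0

def pvSetRC (M : List (List Int)) (i j : Int) (v : Int) : List (List Int) :=
  PySem.List.pySetD M i (PySem.List.pySetD (PySem.List.pyGetD M i []) j v)

def pvMatrixModP (A : List (List Int)) (ms ns mods : Int) : List (List Int) :=
  (PySem.List.pyRange 0 ms 1).foldl (fun M i =>
    (PySem.List.pyRange 0 ns 1).foldl (fun M j =>
      pvSetRC M i j (PySem.Int.mod (pvGetRC M i j) mods)) M) A

def pvMatrixDot (A B : List (List Int)) (ms o ns mods : Int) : List (List Int) :=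
  let M0 : List (List Int) := (PySem.List.pyRange 0 ms 1).map (fun _ => ([] : List Int));
  let M1 := (PySem.List.pyRange 0 ms 1).foldl (fun M i =>
    (PySem.List.pyRange 0 ns 1).foldl (fun M _j =>
      PySem.List.pySetD M i (PySem.List.pyGetD M i [] ++ [0])) M) M0;
  let M2 := (PySem.List.pyRange 0 ms 1).foldl (fun M i =>
    (PySem.List.pyRange 0 ns 1).foldl (fun M j =>
      (PySem.List.pyRange 0 o 1).foldl (fun M k =>
        pvSetRC M i j (pvGetRC M i j + pvGetRC A i k * pvGetRC B k j)) M) M) M1;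
  pvMatrixModP M2 ms ns mods

def pvMatrixAdd (A B : List (List Int)) (ms ns mods : Int) : List (List Int) :=
  let M0 : List (List Int) := (PySem.List.pyRange 0 ms 1).map (fun _ => ([] : List Int));
  let M1 := (PySem.List.pyRange 0 ms 1).foldl (fun M i =>
    (PySem.List.pyRange 0 ns 1).foldl (fun M _j =>
      PySem.List.pySetD M i (PySem.List.pyGetD M i [] ++ [0])) M) M0;
  let M2 := (PySem.List.pyRange 0 ms 1).foldl (fun M i =>
    (PySem.List.pyRange 0 ns 1).foldl (fun M j =>
      pvSetRC M i j (pvGetRC A i j + pvGetRC B i j)) M) M1;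
  pvMatrixModP M2 ms ns mods

def lattice_encryption (plaintext : List Int) (Mhard : List (List Int)) (Msoft : List (List (List Int))) (random_numbers : List (List (List Int))) (N : Int) (ns : Int) (mods : Int) : List (List Int) :=
  let temp : List (List Int) := [plaintext];
  let ciphertext := pvMatrixDot temp Mhard 1 N (2 * N) mods;
  (PySem.List.pyRange 0 ns 1).foldl (fun ciphertext i =>
    let add := pvMatrixDot (PySem.List.pyGetD random_numbers i [])
                           (PySem.List.pyGetD Msoft i []) 1 N (2 * N) mods;
    pvMatrixAdd ciphertext add 1 (2 * N) mods) ciphertext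

-- ===== PORT B =====
def lattice_encryption_alt (plaintext : List Int) (Mhard : List (List Int)) (Msoft : List (List (List Int))) (random_numbers : List (List (List Int))) (N : Int) (ns : Int) (mods : Int) : List (List Int) :=
  let row := (PySem.List.pyRange 0 (2 * N) 1).foldl (fun row j =>
    let s0 := (PySem.List.pyRange 0 N 1).foldl (fun s k =>
      s + PySem.List.pyGetD plaintext k 0 *
          PySem.List.pyGetD (PySem.List.pyGetD Mhard k []) j 0) 0;
    let s1 := (PySem.List.pyRange 0 ns 1).foldl (fun s i =>
      s + (PySem.List.pyRange 0 N 1).foldl (fun t k =>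
        t + PySem.List.pyGetD (PySem.List.pyGetD (PySem.List.pyGetD random_numbers i []) 0 []) k 0 *
            PySem.List.pyGetD (PySem.List.pyGetD (PySem.List.pyGetD Msoft i []) k []) j 0) 0) s0;
    row ++ [PySem.Int.mod s1 mods]) ([] : List Int);
  [row]

-- ===== PRECONDITION & SPEC =====
-- Exactly the inputs on which the Python A returns: when 0 < ns the first ns entries of
-- random_numbers/Msoft must exist, and when 0 < N the mod base must be nonzero and every row
-- actually indexed (plaintext, the first N rows of Mhard and of each used Msoft[i], each used
-- random_numbers[i][0]) must be long enough; otherwise A raises IndexError/ZeroDivisionError.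
def Pre_lattice_encryption (plaintext : List Int) (Mhard : List (List Int)) (Msoft : List (List (List Int))) (random_numbers : List (List (List Int))) (N : Int) (ns : Int) (mods : Int) : Prop :=
  (0 < ns → ns ≤ (random_numbers.length : Int) ∧ ns ≤ (Msoft.length : Int)) ∧
  (0 < N → mods ≠ 0 ∧
    N ≤ (plaintext.length : Int) ∧ N ≤ (Mhard.length : Int) ∧
    (∀ row ∈ Mhard.take N.toNat, 2 * N ≤ (row.length : Int)) ∧
    (∀ r ∈ random_numbers.take ns.toNat, r ≠ [] ∧ N ≤ ((r.headD []).length : Int)) ∧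
    (∀ M ∈ Msoft.take ns.toNat, N ≤ (M.length : Int) ∧
      ∀ row ∈ M.take N.toNat, 2 * N ≤ (row.length : Int)))
instance (plaintext : List Int) (Mhard : List (List Int)) (Msoft : List (List (List Int))) (random_numbers : List (List (List Int))) (N : Int) (ns : Int) (mods : Int) : Decidable (Pre_lattice_encryption plaintext Mhard Msoft random_numbers N ns mods) := by unfold Pre_lattice_encryption; infer_instance

def pvWitness_lattice_encryption : List Int × List (List Int) × List (List (List Int)) × List (List (List Int)) × Int × Int × Int :=
  ([1], [[1, 2]], [[[3, 4]]], [[[2]]], 1, 1, 5)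

def Spec_lattice_encryption (plaintext : List Int) (Mhard : List (List Int)) (Msoft : List (List (List Int))) (random_numbers : List (List (List Int))) (N : Int) (ns : Int) (mods : Int) (out : List (List Int)) : Prop := out = lattice_encryption_alt plaintext Mhard Msoft random_numbers N ns mods
instance (plaintext : List Int) (Mhard : List (List Int)) (Msoft : List (List (List Int))) (random_numbers : List (List (List Int))) (N : Int) (ns : Int) (mods : Int) (out : List (List Int)) : Decidable (Spec_lattice_encryption plaintext Mhard Msoft random_numbers N ns mods out) := by unfold Spec_lattice_encryption; infer_instance

-- ===== CLAIM (what is proved, stated in full; the proofs are below) =====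
def Claim_equal_lattice_encryption : Prop := ∀ (plaintext : List Int) (Mhard : List (List Int)) (Msoft : List (List (List Int))) (random_numbers : List (List (List Int))) (N : Int) (ns : Int) (mods : Int), Dom_lattice_encryption plaintext Mhard Msoft random_numbers N ns mods → Pre_lattice_encryption plaintext Mhard Msoft random_numbers N ns mods → Spec_lattice_encryption plaintext Mhard Msoft random_numbers N ns mods (lattice_encryption plaintext Mhard Msoft random_numbers N ns mods)

-- ===== LEMMAS AND PROOFS =====
def pvDotRow (A B : List (List Int)) (o j : Int) : Int :=
  ((PySem.List.pyRange 0 o 1).map (fun k => pvGetRC A 0 k * pvGetRC B k j)).sum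

theorem pv_foldl_lift {α : Type} (g : List (List Int) → α → List (List Int))
    (f : List Int → α → List Int) (h : ∀ r x, g [r] x = [f r x]) :
    ∀ (l : List α) (r : List Int), l.foldl g [r] = [l.foldl f r] := by
  intro l
  induction l with
  | nil => intro r; rfl
  | cons x xs ih => intro r; simp only [List.foldl_cons, h]; exact ih _

theorem pv_setRC_zero (r : List Int) (j v : Int) :
    pvSetRC [r] 0 j v = [PySem.List.pySetD r j v] := by
  simp [pvSetRC, PySem.List.pyGetD_zero_cons, PySem.List.pySetD_of_nonneg _ _ (le_refl (0:Int))]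

theorem pv_getRC_zero (r : List Int) (j : Int) :
    pvGetRC [r] 0 j = PySem.List.pyGetD r j 0 := by
  simp [pvGetRC, PySem.List.pyGetD_zero_cons]

theorem pv_pySetD_oob (r : List Int) (j : Int) (v : Int) (hj : 0 ≤ j)
    (h : r.length ≤ j.toNat) : PySem.List.pySetD r j v = r := by
  rw [PySem.List.pySetD_of_nonneg _ _ hj]; exact List.set_eq_of_length_le h

theorem pv_pySetD_get_self (r : List Int) (j : Int) (hj : 0 ≤ j) (hlt : j.toNat < r.length) :
    PySem.List.pySetD r j (PySem.List.pyGetD r j 0) = r := by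
  rw [PySem.List.pySetD_of_nonneg _ _ hj, PySem.List.pyGetD_of_nonneg _ _ hj,
      List.getD_eq_getElem _ _ hlt, List.set_getElem_self]

theorem pv_pySetD_acc (j : Int) (hj : 0 ≤ j) (c : Int → Int) :
    ∀ (l : List Int) (r : List Int) (v : Int), j.toNat < r.length →
      l.foldl (fun r k => PySem.List.pySetD r j (PySem.List.pyGetD r j 0 + c k))
        (PySem.List.pySetD r j v)
      = PySem.List.pySetD r j (v + (l.map c).sum) := by
  intro l
  induction l with
  | nil => intro r v _; simp
  | cons x xs ih =>
    intro r v hlt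
    simp only [List.foldl_cons]
    rw [PySem.List.pyGetD_of_nonneg _ _ hj, PySem.List.pySetD_of_nonneg _ _ hj,
        PySem.List.pySetD_of_nonneg _ _ hj,
        List.getD_eq_getElem _ _ (by simpa using hlt), List.getElem_set_self, List.set_set]
    rw [← PySem.List.pySetD_of_nonneg r (v + c x) hj]
    rw [ih r (v + c x) hlt]
    simp [add_assoc]

theorem pv_inner_dot (j : Int) (hj : 0 ≤ j) (c : Int → Int) (l : List Int) (r : List Int) :
    l.foldl (fun r k => PySem.List.pySetD r j (PySem.List.pyGetD r j 0 + c k)) r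
      = PySem.List.pySetD r j (PySem.List.pyGetD r j 0 + (l.map c).sum) := by
  by_cases hlt : j.toNat < r.length
  · conv_lhs => rw [← pv_pySetD_get_self r j hj hlt]
    exact pv_pySetD_acc j hj c l r _ hlt
  · rw [Nat.not_lt] at hlt
    rw [pv_pySetD_oob r j _ hj hlt]
    induction l with
    | nil => rfl
    | cons x xs ih => simp only [List.foldl_cons]; rw [pv_pySetD_oob r j _ hj hlt]; exact ih

theorem pv_foldl_set_range (u : Nat → Int → Int) :
    ∀ (m : Nat) (r : List Int), m ≤ r.length →
      (List.range m).foldl (fun r j => r.set j (u j (r.getD j 0))) r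
        = (List.range m).map (fun j => u j (r.getD j 0)) ++ r.drop m := by
  intro m
  induction m with
  | zero => intro r _; simp
  | succ m ih =>
    intro r hm
    have hmlt : m < r.length := hm
    rw [List.range_succ, List.foldl_append, List.foldl_cons, List.foldl_nil, ih r (le_of_lt hmlt)]
    have hget : ((List.range m).map (fun j => u j (r.getD j 0)) ++ r.drop m).getD m 0
        = r.getD m 0 := by
      rw [List.getD_eq_getElem _ _ (by simp; omega), List.getElem_append_right (by simp),
          List.getD_eq_getElem _ _ hmlt]
      simp
    rw [hget, List.set_append, if_neg (by simp), List.length_map, List.length_range]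
    have hdrop : r.drop m = r[m] :: r.drop (m+1) := (List.getElem_cons_drop hmlt).symm
    rw [hdrop]
    simp only [Nat.sub_self, List.set_cons_zero, List.map_append, List.map_cons,
      List.map_nil, List.append_assoc, List.cons_append, List.nil_append]

theorem pv_foldl_set_pyRange (u : Int → Int → Int) (w : Int) (r : List Int)
    (hr : r.length = w.toNat) :
    (PySem.List.pyRange 0 w 1).foldl
        (fun r j => PySem.List.pySetD r j (u j (PySem.List.pyGetD r j 0))) r
      = (List.range w.toNat).map (fun (j : Nat) => u (j : Int) (r.getD j 0)) := by
  have hrng : PySem.List.pyRange 0 w 1 = (List.range w.toNat).map (fun (k : Nat) => ((k : Int))) := by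
    rw [PySem.List.pyRange_one]; simp
  rw [hrng, List.foldl_map]
  simp only [PySem.List.pySetD_natCast, PySem.List.pyGetD_natCast]
  rw [pv_foldl_set_range (fun j x => u (j : Int) x) w.toNat r (le_of_eq hr.symm)]
  simp [hr]

theorem pv_modP_one (r : List Int) (w mods : Int) (hr : r.length = w.toNat) :
    pvMatrixModP [r] 1 w mods
      = [(List.range w.toNat).map (fun j => PySem.Int.mod (r.getD j 0) mods)] := by
  unfold pvMatrixModP
  have h1 : PySem.List.pyRange 0 1 1 = [0] := by decide
  rw [h1, List.foldl_cons, List.foldl_nil]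
  rw [pv_foldl_lift _ (fun r j => PySem.List.pySetD r j (PySem.Int.mod (PySem.List.pyGetD r j 0) mods))
      (fun r j => by rw [pv_getRC_zero, pv_setRC_zero])]
  rw [pv_foldl_set_pyRange (fun _ x => PySem.Int.mod x mods) w r hr]

theorem pv_zeros_one (w : Int) :
    (PySem.List.pyRange 0 1 1).foldl (fun M i =>
      (PySem.List.pyRange 0 w 1).foldl (fun M _j =>
        PySem.List.pySetD M i (PySem.List.pyGetD M i [] ++ [0])) M)
      ((PySem.List.pyRange 0 1 1).map (fun _ => ([] : List Int)))
    = [(PySem.List.pyRange 0 w 1).map (fun _ => (0 : Int))] := by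
  have h1 : PySem.List.pyRange 0 1 1 = [0] := by decide
  rw [h1]
  simp only [List.map_cons, List.map_nil, List.foldl_cons, List.foldl_nil]
  rw [pv_foldl_lift _ (fun r _ => r ++ [(0 : Int)])
      (fun r x => by
        rw [PySem.List.pyGetD_zero_cons, PySem.List.pySetD_of_nonneg _ _ (le_refl (0:Int))]
        rfl)]
  rw [PySem.List.foldl_append_singleton_eq_map (fun _ => (0 : Int))]
  simp

theorem pv_dot_one (A B : List (List Int)) (o w mods : Int) :
    pvMatrixDot A B 1 o w mods
      = [(List.range w.toNat).map (fun (j : Nat) => PySem.Int.mod (pvDotRow A B o (j : Int)) mods)] := by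
  unfold pvMatrixDot
  dsimp only
  rw [pv_zeros_one w]
  have h1 : PySem.List.pyRange 0 1 1 = [0] := by decide
  rw [h1, List.foldl_cons, List.foldl_nil]
  rw [pv_foldl_lift _
      (fun r j => (PySem.List.pyRange 0 o 1).foldl (fun r k =>
        PySem.List.pySetD r j (PySem.List.pyGetD r j 0 + pvGetRC A 0 k * pvGetRC B k j)) r)
      (fun r j => by
        rw [pv_foldl_lift _ (fun r k =>
          PySem.List.pySetD r j (PySem.List.pyGetD r j 0 + pvGetRC A 0 k * pvGetRC B k j))
          (fun r k => by rw [pv_setRC_zero, pv_getRC_zero])])]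
  have hcongr : ((PySem.List.pyRange 0 w 1).foldl (fun r j =>
      (PySem.List.pyRange 0 o 1).foldl (fun r k =>
        PySem.List.pySetD r j (PySem.List.pyGetD r j 0 + pvGetRC A 0 k * pvGetRC B k j)) r)
      ((PySem.List.pyRange 0 w 1).map (fun _ => (0:Int))))
    = ((PySem.List.pyRange 0 w 1).foldl (fun r j =>
        PySem.List.pySetD r j (PySem.List.pyGetD r j 0 + pvDotRow A B o j))
      ((PySem.List.pyRange 0 w 1).map (fun _ => (0:Int)))) := by
    apply PySem.List.foldl_congr_mem
    intro acc j hj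
    have hj0 : 0 ≤ j := ((PySem.List.mem_pyRange_one).1 hj).1
    rw [pv_inner_dot j hj0]
    rfl
  rw [hcongr]
  rw [pv_foldl_set_pyRange (fun j x => x + pvDotRow A B o j) w _ (by simp [PySem.List.pyRange_one])]
  rw [pv_modP_one _ w mods (by simp)]
  congr 1
  apply List.map_congr_left
  intro j hj
  rw [PySem.List.getD_map_range _ _ _ _ (List.mem_range.1 hj)]
  have : ((PySem.List.pyRange 0 w 1).map (fun _ => (0:Int))).getD j 0 = 0 := by
    rcases Nat.lt_or_ge j ((PySem.List.pyRange 0 w 1).map (fun _ => (0:Int))).length with h | h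
    · rw [List.getD_eq_getElem _ _ h]; simp
    · rw [List.getD_eq_default _ _ h]
  rw [this, zero_add]

theorem pv_add_one (c d : List Int) (w mods : Int) :
    pvMatrixAdd [c] [d] 1 w mods
      = [(List.range w.toNat).map (fun (j : Nat) =>
          PySem.Int.mod (c.getD j 0 + d.getD j 0) mods)] := by
  unfold pvMatrixAdd
  dsimp only
  rw [pv_zeros_one w]
  have h1 : PySem.List.pyRange 0 1 1 = [0] := by decide
  rw [h1, List.foldl_cons, List.foldl_nil]
  rw [pv_foldl_lift _
      (fun r j => PySem.List.pySetD r j (pvGetRC [c] 0 j + pvGetRC [d] 0 j))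
      (fun r j => by rw [pv_setRC_zero])]
  have hstep : ((PySem.List.pyRange 0 w 1).foldl (fun r j =>
      PySem.List.pySetD r j (pvGetRC [c] 0 j + pvGetRC [d] 0 j))
      ((PySem.List.pyRange 0 w 1).map (fun _ => (0:Int))))
    = (List.range w.toNat).map (fun (j : Nat) =>
        (fun (j : Int) (_ : Int) => pvGetRC [c] 0 j + pvGetRC [d] 0 j) (j : Int)
          (((PySem.List.pyRange 0 w 1).map (fun _ => (0:Int))).getD j 0)) :=
    pv_foldl_set_pyRange (fun j _ => pvGetRC [c] 0 j + pvGetRC [d] 0 j) w _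
      (by simp [PySem.List.pyRange_one])
  rw [hstep]
  rw [pv_modP_one _ w mods (by simp)]
  congr 1
  apply List.map_congr_left
  intro j hj
  rw [PySem.List.getD_map_range _ _ _ _ (List.mem_range.1 hj)]
  simp only [pv_getRC_zero, PySem.List.pyGetD_natCast]

theorem pv_mod_add_mod (x y m : Int) :
    PySem.Int.mod (PySem.Int.mod x m + PySem.Int.mod y m) m = PySem.Int.mod (x + y) m := by
  show (x.fmod m + y.fmod m).fmod m = (x + y).fmod m
  exact (Int.add_fmod x y m).symm

theorem pv_loop (rnum Ms : List (List (List Int))) (N w mods : Int) :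
    ∀ (l : List Int) (P : Int → Int),
      l.foldl (fun c i =>
          pvMatrixAdd c (pvMatrixDot (PySem.List.pyGetD rnum i [])
            (PySem.List.pyGetD Ms i []) 1 N w mods) 1 w mods)
        [(List.range w.toNat).map (fun (j : Nat) => PySem.Int.mod (P (j : Int)) mods)]
      = [(List.range w.toNat).map (fun (j : Nat) => PySem.Int.mod
          (P (j : Int) + (l.map (fun i => pvDotRow (PySem.List.pyGetD rnum i [])
            (PySem.List.pyGetD Ms i []) N (j : Int))).sum) mods)] := by
  intro l
  induction l with
  | nil => intro P; simp
  | cons x xs ih =>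
    intro P
    rw [List.foldl_cons, pv_dot_one,
        pv_add_one _ _ w mods]
    have hrw : ((List.range w.toNat).map (fun (j : Nat) =>
        PySem.Int.mod ((((List.range w.toNat).map (fun (j : Nat) => PySem.Int.mod (P (j:Int)) mods)).getD j 0)
          + (((List.range w.toNat).map (fun (j : Nat) => PySem.Int.mod (pvDotRow (PySem.List.pyGetD rnum x []) (PySem.List.pyGetD Ms x []) N (j:Int)) mods)).getD j 0)) mods))
      = (List.range w.toNat).map (fun (j : Nat) =>
          PySem.Int.mod (P (j:Int) + pvDotRow (PySem.List.pyGetD rnum x []) (PySem.List.pyGetD Ms x []) N (j:Int)) mods) := by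
      apply List.map_congr_left
      intro j hj
      rw [PySem.List.getD_map_range _ _ _ _ (List.mem_range.1 hj),
          PySem.List.getD_map_range _ _ _ _ (List.mem_range.1 hj),
          pv_mod_add_mod]
    rw [hrw]
    have hih := ih (fun jj => P jj + pvDotRow (PySem.List.pyGetD rnum x []) (PySem.List.pyGetD Ms x []) N jj)
    beta_reduce at hih
    rw [hih]
    congr 1
    apply List.map_congr_left
    intro j _
    simp [add_assoc]

theorem pv_main (plaintext : List Int) (Mhard : List (List Int)) (Msoft : List (List (List Int))) (random_numbers : List (List (List Int))) (N : Int) (ns : Int) (mods : Int) :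
    lattice_encryption plaintext Mhard Msoft random_numbers N ns mods
      = lattice_encryption_alt plaintext Mhard Msoft random_numbers N ns mods := by
  unfold lattice_encryption lattice_encryption_alt
  dsimp only
  rw [pv_dot_one [plaintext] Mhard N (2 * N) mods]
  have hloop := pv_loop random_numbers Msoft N (2 * N) mods (PySem.List.pyRange 0 ns 1)
    (fun j => pvDotRow [plaintext] Mhard N j)
  beta_reduce at hloop
  rw [hloop]
  rw [PySem.List.foldl_append_singleton_eq_map
    (fun j => PySem.Int.mod
      ((PySem.List.pyRange 0 ns 1).foldl (fun s i =>
        s + (PySem.List.pyRange 0 N 1).foldl (fun t k =>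
          t + PySem.List.pyGetD (PySem.List.pyGetD (PySem.List.pyGetD random_numbers i []) 0 []) k 0 *
              PySem.List.pyGetD (PySem.List.pyGetD (PySem.List.pyGetD Msoft i []) k []) j 0) 0)
        ((PySem.List.pyRange 0 N 1).foldl (fun s k =>
          s + PySem.List.pyGetD plaintext k 0 *
              PySem.List.pyGetD (PySem.List.pyGetD Mhard k []) j 0) 0)) mods)]
  rw [List.nil_append, PySem.List.pyRange_one 0 (2 * N)]
  rw [List.map_map]
  simp only [Function.comp_def, Int.sub_zero, zero_add]
  congr 1
  apply List.map_congr_left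
  intro j _
  rw [PySem.List.foldl_add, PySem.List.foldl_add, zero_add]
  congr 1
  all_goals simp [pvDotRow, pvGetRC, PySem.List.pyGetD_zero_cons, PySem.List.pyGetD_natCast,
    List.getD, PySem.List.foldl_add]

-- ===== VERDICT (by name: the statement is the Claim_ definition above) =====
theorem lattice_encryption_spec : Claim_equal_lattice_encryption := by
  intro plaintext Mhard Msoft random_numbers N ns mods _hDom _hPre
  unfold Spec_lattice_encryption
  exact pv_main plaintext Mhard Msoft random_numbers N ns mods
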